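-- pv_equiv track=rewrite | github.com/Diegothx/DesafioRuuf | main.py | colocar_paneles_recursivamente
-- ===== SOURCE A (Python) =====
-- from typing import List,  Dict
--
-- def colocar_panel(roof_grid: List[List[int]], panel_w: int, panel_h: int) -> bool:
--     for col in range(len(roof_grid)):
--         for row in range(len(roof_grid[0])):
--             if roof_grid[col][row] != 0:
--                 continue
--             if (
--                 col + panel_w <= len(roof_grid) and
--                 roof_grid[col + panel_w - 1][row] == 0 and
--                 row + panel_h <= len(roof_grid[0]) and
--                 roof_grid[col][row + panel_h - 1] == 0
--             ):
--                 for w in range(panel_w):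
--                     for h in range(panel_h):
--                         roof_grid[col + w][row + h] = 1
--                 return True
--     return False
--
-- def colocar_paneles_recursivamente(roof_grid: List[List[int]], panel_width: int, panel_height: int) -> int:
--     orientacion_normal = 0
--     orientacion_rotada = 0
--     grid_normal = [col[:] for col in roof_grid]
--     grid_rotada = [col[:] for col in roof_grid]
--
--     if colocar_panel(grid_normal, panel_width, panel_height):
--         orientacion_normal = 1 + colocar_paneles_recursivamente(
--             grid_normal, panel_width, panel_height
--         )
--
--     if colocar_panel(grid_rotada, panel_height, panel_width):
--         orientacion_rotada = 1 + colocar_paneles_recursivamente(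
--             grid_rotada, panel_height, panel_width
--         )
--
--     return max(orientacion_normal, orientacion_rotada)
-- ===== SOURCE B (Python) =====
-- def colocar_paneles_recursivamente(roof_grid, panel_width, panel_height):
--     cols = len(roof_grid)
--     rows = len(roof_grid[0]) if roof_grid else 0
--
--     def fits(grid, c, r, w, h):
--         return (grid[c][r] == 0
--                 and c + w <= cols and grid[c + w - 1][r] == 0
--                 and r + h <= rows and grid[c][r + h - 1] == 0)
--
--     def place(grid, w, h):
--         pos = next(((c, r) for c in range(cols) for r in range(rows)
--                     if fits(grid, c, r, w, h)), None)
--         if pos is None: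
--             return None
--         c0, r0 = pos
--         return tuple(tuple(1 if (c0 <= c < c0 + w and r0 <= r < r0 + h) else v
--                            for r, v in enumerate(column))
--                      for c, column in enumerate(grid))
--
--     memo = {}
--
--     def solve(grid, w, h):
--         key = (grid, w, h)
--         if key in memo:
--             return memo[key]
--         normal = rotated = 0
--         g = place(grid, w, h)
--         if g is not None:
--             normal = 1 + solve(g, w, h)
--         g = place(grid, h, w)
--         if g is not None:
--             rotated = 1 + solve(g, h, w)
--         res = max(normal, rotated)
--         memo[key] = res
--         return res
--
--     return solve(tuple(map(tuple, roof_grid)), panel_width, panel_height)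
-- ===== Notes on version B (the rewrite author's own statement) =====
-- stated objective: alternative
-- what changed: B memoizes the two-orientation branching recursion in a dictionary keyed by (grid state, panel dims), so each distinct reachable grid configuration is solved once instead of once per branch of A's search tree, and it finds each placement with a single generator scan instead of nested loops with early return.
import Mathlib
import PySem

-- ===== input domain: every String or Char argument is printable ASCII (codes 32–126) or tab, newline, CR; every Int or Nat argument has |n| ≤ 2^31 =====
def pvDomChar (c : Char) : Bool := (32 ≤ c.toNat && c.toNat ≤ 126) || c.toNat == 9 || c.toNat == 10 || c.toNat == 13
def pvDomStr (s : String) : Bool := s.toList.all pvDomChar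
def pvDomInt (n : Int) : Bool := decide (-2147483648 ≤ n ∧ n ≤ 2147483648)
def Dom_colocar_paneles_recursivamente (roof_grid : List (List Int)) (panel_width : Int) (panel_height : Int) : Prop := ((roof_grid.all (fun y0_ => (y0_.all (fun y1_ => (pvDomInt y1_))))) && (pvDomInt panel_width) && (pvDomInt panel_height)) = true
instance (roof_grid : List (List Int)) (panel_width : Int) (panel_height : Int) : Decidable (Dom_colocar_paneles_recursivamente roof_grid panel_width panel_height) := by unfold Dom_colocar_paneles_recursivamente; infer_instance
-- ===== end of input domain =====

-- B memoizes the branching recursion on the grid state (a dict keyed by (grid, w, h)), so each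
-- distinct sub-configuration is solved once; A re-solves it in every branch of its search tree.
-- A mutates its local grid copies only; the caller's roof_grid is never mutated by either version.

-- ===== PORT A =====
-- shared shape helpers: number of columns is roof_grid.length, number of scanned rows is len(roof_grid[0])
def pvRows (g : List (List Int)) : Nat := (g.headD []).length

-- grid read roof_grid[c][r]; default 1 (≠ 0) is never read inside Pre_ (all scanned indices are in range there)
def pvCell (g : List (List Int)) (c r : Nat) : Int := (g.getD c []).getD r 1

-- the fitting condition of A's `if` (after the `continue`), in Python's conjunct order
def pvCondA (g : List (List Int)) (col row : Nat) (pw ph : Int) : Bool :=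
  decide ((col : Int) + pw ≤ (g.length : Int)) && (pvCell g ((col : Int) + pw - 1).toNat row == 0) &&
  decide ((row : Int) + ph ≤ (pvRows g : Int)) && (pvCell g col ((row : Int) + ph - 1).toNat == 0)

-- Python's inner fill loop `for h in range(panel_h): grid[col+w][row+h] = 1` on one column list
def pvFillRowA (l : List Int) (row : Nat) (ph : Int) : List Int :=
  (List.range ph.toNat).foldl (fun l h => l.set (row + h) 1) l

-- Python's outer fill loop `for w in range(panel_w): …` (functional rendering of the in-place writes)
def pvFillA (g : List (List Int)) (col row : Nat) (pw ph : Int) : List (List Int) :=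
  (List.range pw.toNat).foldl
    (fun g w => g.set (col + w) (pvFillRowA (g.getD (col + w) []) row ph)) g

-- the inner row loop of colocar_panel over the remaining row indices (early return = some)
def pvScanRows (g : List (List Int)) (pw ph : Int) (col : Nat) : List Nat → Option (List (List Int))
  | [] => none
  | r :: rest =>
    if pvCell g col r ≠ 0 then pvScanRows g pw ph col rest
    else if pvCondA g col r pw ph then some (pvFillA g col r pw ph)
    else pvScanRows g pw ph col rest

-- the outer column loop of colocar_panel over the remaining column indices
def pvScanCols (g : List (List Int)) (pw ph : Int) : List Nat → Option (List (List Int))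
  | [] => none
  | c :: rest =>
    match pvScanRows g pw ph c (List.range (pvRows g)) with
    | some g' => some g'
    | none => pvScanCols g pw ph rest

-- colocar_panel: `some g'` = Python returns True having mutated the grid copy to g'; `none` = False.
-- Totalization guard: for pw ≤ 0 or ph ≤ 0 Python either diverges (empty fill loops) or wraps/raises on
-- negative corner indices; Pre_ admits such dimensions only when the grid has no reachable zero cell,
-- where Python's scan also places nothing — so inside Pre_ the guard agrees with Python.
def pvColocarPanel (g : List (List Int)) (pw ph : Int) : Option (List (List Int)) :=
  if pw ≤ 0 ∨ ph ≤ 0 then none else pvScanCols g pw ph (List.range g.length)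

-- number of zero cells: every successful placement removes at least one
-- (pv_zeros_lt_of_place below), so it bounds the recursion depth
def pvZeros (g : List (List Int)) : Nat := (g.map (fun col => col.count 0)).sum

-- the recursive function itself: try normal orientation, try rotated orientation, take the max.
-- fuel is a pure totalization device: `pvZeros g + 1` units never run out, so the 0-case is unreachable
def pvRec (fuel : Nat) (g : List (List Int)) (pw ph : Int) : Int :=
  match fuel with
  | 0 => 0
  | fuel + 1 =>
    let normal : Int :=
      match pvColocarPanel g pw ph with
      | some g' => 1 + pvRec fuel g' pw ph
      | none => 0
    let rotada : Int :=
      match pvColocarPanel g ph pw with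
      | some g' => 1 + pvRec fuel g' ph pw
      | none => 0
    max normal rotada

def colocar_paneles_recursivamente (roof_grid : List (List Int)) (panel_width : Int) (panel_height : Int) : Int :=
  pvRec (pvZeros roof_grid + 1) roof_grid panel_width panel_height

-- ===== PORT B =====
-- Source B's `fits(grid, c, r, w, h)`: the free-cell check conjoined with A's fitting condition
def pvFitsB (g : List (List Int)) (pw ph : Int) (p : Nat × Nat) : Bool :=
  (pvCell g p.1 p.2 == 0) && pvCondA g p.1 p.2 pw ph

-- Source B's tuple-of-tuples rebuild: 1 inside the placed rectangle, old value elsewhere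
def pvFillB (g : List (List Int)) (col row : Nat) (pw ph : Int) : List (List Int) :=
  g.mapIdx (fun c column => column.mapIdx (fun r v =>
    if col ≤ c ∧ (c : Int) < (col : Int) + pw ∧ row ≤ r ∧ (r : Int) < (row : Int) + ph
    then (1 : Int) else v))

-- Source B's `place`: first fitting position of the generator (col-major), rebuilt grid; same
-- totalization guard as pvColocarPanel (see the comment there)
def pvPlaceB (g : List (List Int)) (pw ph : Int) : Option (List (List Int)) :=
  if pw ≤ 0 ∨ ph ≤ 0 then none
  else
    (((List.range g.length).flatMap (fun c => (List.range (pvRows g)).map (fun r => (c, r)))).find?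
       (pvFitsB g pw ph)).map (fun p => pvFillB g p.1 p.2 pw ph)

def pvSolve (fuel : Nat) (memo : PySem.Dict (List (List Int) × Int × Int) Int)
    (g : List (List Int)) (pw ph : Int) :
    Int × PySem.Dict (List (List Int) × Int × Int) Int :=
  match fuel with
  | 0 => (0, memo)
  | fuel + 1 =>
    match memo.get? (g, pw, ph) with
    | some v => (v, memo)
    | none =>
      let n1 : Int × PySem.Dict (List (List Int) × Int × Int) Int :=
        match pvPlaceB g pw ph with
        | some g' => let p := pvSolve fuel memo g' pw ph; (1 + p.1, p.2)
        | none => (0, memo)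
      let n2 : Int × PySem.Dict (List (List Int) × Int × Int) Int :=
        match pvPlaceB g ph pw with
        | some g' => let p := pvSolve fuel n1.2 g' ph pw; (1 + p.1, p.2)
        | none => (0, n1.2)
      (max n1.1 n2.1, n2.2.insert (g, pw, ph) (max n1.1 n2.1))

def colocar_paneles_recursivamente_alt (roof_grid : List (List Int)) (panel_width : Int) (panel_height : Int) : Int :=
  (pvSolve (pvZeros roof_grid + 1) PySem.Dict.empty roof_grid panel_width panel_height).1

-- ===== PRECONDITION & SPEC =====
-- One scanned position admits no panel with top-left corner there, checked exactly as Python reads it: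
-- short-circuit conjuncts, corner reads with negative-index wraparound, `false` when the read would
-- raise (index below -len) or when the panel would fit.  Pure input inspection, used only by Pre_.
def pvSafeNoFit (roof_grid : List (List Int)) (c r : Nat) (w h : Int) : Bool :=
  let cols : Int := roof_grid.length
  let rows : Int := (roof_grid.headD []).length
  let col := roof_grid.getD c []
  if col.getD r 1 ≠ 0 then true
  else if cols < (c : Int) + w then true
  else
    let i : Int := (c : Int) + w - 1
    if i < -cols then false
    else if (roof_grid.getD (if i < 0 then cols + i else i).toNat []).getD r 1 ≠ 0 then true
    else if rows < (r : Int) + h then true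
    else
      let L : Int := col.length
      let j : Int := (r : Int) + h - 1
      if j < -L then false
      else if col.getD (if j < 0 then L + j else j).toNat 1 ≠ 0 then true
      else false

-- Pre_ excludes exactly the inputs where A raises or diverges: rows shorter than the first row
-- (A's final full scan indexes them and raises IndexError), and non-positive panel dimensions
-- unless no scanned position admits a panel in either orientation (a fitting panel with an empty
-- fill loop leaves the grid unchanged and A recurses forever; an index below -len raises) —
-- when nothing fits, A safely returns 0.
def Pre_colocar_paneles_recursivamente (roof_grid : List (List Int)) (panel_width : Int) (panel_height : Int) : Prop :=
  (∀ row ∈ roof_grid, (roof_grid.headD []).length ≤ row.length) ∧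
  (1 ≤ panel_width ∧ 1 ≤ panel_height ∨
    ∀ c ∈ List.range roof_grid.length, ∀ r ∈ List.range (roof_grid.headD []).length,
      pvSafeNoFit roof_grid c r panel_width panel_height = true ∧
      pvSafeNoFit roof_grid c r panel_height panel_width = true)
instance (roof_grid : List (List Int)) (panel_width : Int) (panel_height : Int) : Decidable (Pre_colocar_paneles_recursivamente roof_grid panel_width panel_height) := by unfold Pre_colocar_paneles_recursivamente; infer_instance

def pvWitness_colocar_paneles_recursivamente : List (List Int) × Int × Int :=
  ([[0, 0, 0], [0, 5, 0], [0, 0, 0]], 2, 1)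

def Spec_colocar_paneles_recursivamente (roof_grid : List (List Int)) (panel_width : Int) (panel_height : Int) (out : Int) : Prop := out = colocar_paneles_recursivamente_alt roof_grid panel_width panel_height
instance (roof_grid : List (List Int)) (panel_width : Int) (panel_height : Int) (out : Int) : Decidable (Spec_colocar_paneles_recursivamente roof_grid panel_width panel_height out) := by unfold Spec_colocar_paneles_recursivamente; infer_instance

-- ===== CLAIM (what is proved, stated in full; the proofs are below) =====
def Claim_equal_colocar_paneles_recursivamente : Prop := ∀ (roof_grid : List (List Int)) (panel_width : Int) (panel_height : Int), Dom_colocar_paneles_recursivamente roof_grid panel_width panel_height → Pre_colocar_paneles_recursivamente roof_grid panel_width panel_height → Spec_colocar_paneles_recursivamente roof_grid panel_width panel_height (colocar_paneles_recursivamente roof_grid panel_width panel_height)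

-- ===== LEMMAS AND PROOFS =====
theorem pv_count0_foldl_set_le (row : Nat) (L : List Nat) (l : List Int) :
    (L.foldl (fun l h => l.set (row + h) (1 : Int)) l).count 0 ≤ l.count 0 := by
  induction L generalizing l with
  | nil => simp
  | cons h t ih =>
    simp only [List.foldl_cons]
    refine le_trans (ih (l.set (row + h) 1)) ?_
    show (l.set (row + h) 1).count 0 ≤ l.count 0
    by_cases hr : row + h < l.length
    · rw [List.count_set hr]; split <;> split <;> simp_all
    · rw [List.set_eq_of_length_le (by omega)]

theorem pv_count0_fillRow_le (l : List Int) (row : Nat) (ph : Int) :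
    (pvFillRowA l row ph).count 0 ≤ l.count 0 := pv_count0_foldl_set_le row _ l

theorem pv_count0_fillRow_lt (l : List Int) (row : Nat) (ph : Int)
    (h0 : l.getD row 1 = 0) (hph : 1 ≤ ph) :
    (pvFillRowA l row ph).count 0 < l.count 0 := by
  have hrow : row < l.length := by
    by_contra h; rw [List.getD_eq_getElem?_getD, List.getElem?_eq_none (by omega)] at h0; simp at h0
  obtain ⟨n, hn⟩ : ∃ n, ph.toNat = n + 1 := ⟨ph.toNat - 1, by omega⟩
  unfold pvFillRowA
  rw [hn, List.range_succ_eq_map, List.foldl_cons]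
  refine lt_of_le_of_lt (pv_count0_foldl_set_le row _ _) ?_
  show (l.set (row + 0) 1).count 0 < l.count 0
  have hrow0 : row + 0 < l.length := by omega
  have hv : l[row + 0] = (0 : Int) := by
    rw [List.getD_eq_getElem?_getD, List.getElem?_eq_getElem hrow] at h0
    simpa using h0
  have hpos : 0 < l.count (0 : Int) := List.count_pos_iff.mpr (hv ▸ List.getElem_mem _)
  rw [List.count_set hrow0]
  simp
  refine ⟨List.count_pos_iff.mp hpos, ?_⟩
  have h2 : l[row] = (0 : Int) := by simpa using hv
  simp [h2]

theorem pv_zeros_set (g : List (List Int)) (c : Nat) (l' : List Int) (hc : c < g.length) :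
    pvZeros (g.set c l') + (g.getD c []).count 0 = pvZeros g + l'.count 0 := by
  induction g generalizing c with
  | nil => simp at hc
  | cons a t ih =>
    cases c with
    | zero => simp [pvZeros]; omega
    | succ c =>
      have := ih c (by simpa using hc)
      simp [pvZeros] at this ⊢
      omega

theorem pv_zeros_foldl_le (col row : Nat) (ph : Int) (L : List Nat) (g : List (List Int)) :
    pvZeros (L.foldl (fun g w => g.set (col + w) (pvFillRowA (g.getD (col + w) []) row ph)) g)
      ≤ pvZeros g := by
  induction L generalizing g with
  | nil => simp
  | cons w t ih =>
    simp only [List.foldl_cons]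
    refine le_trans (ih (g.set (col + w) (pvFillRowA (g.getD (col + w) []) row ph))) ?_
    show pvZeros (g.set (col + w) (pvFillRowA (g.getD (col + w) []) row ph)) ≤ pvZeros g
    by_cases hc : col + w < g.length
    · have := pv_zeros_set g (col + w) (pvFillRowA (g.getD (col + w) []) row ph) hc
      have hle := pv_count0_fillRow_le (g.getD (col + w) []) row ph
      omega
    · rw [List.set_eq_of_length_le (by omega)]

theorem pv_zeros_fillA_lt (g : List (List Int)) (col row : Nat) (pw ph : Int)
    (hcell : pvCell g col row = 0) (hpw : 1 ≤ pw) (hph : 1 ≤ ph) :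
    pvZeros (pvFillA g col row pw ph) < pvZeros g := by
  have hcol : col < g.length := by
    by_contra h
    have hg : g[col]? = none := List.getElem?_eq_none (by omega)
    simp [pvCell, List.getD_eq_getElem?_getD, hg] at hcell
  obtain ⟨n, hn⟩ : ∃ n, pw.toNat = n + 1 := ⟨pw.toNat - 1, by omega⟩
  unfold pvFillA
  rw [hn, List.range_succ_eq_map, List.foldl_cons]
  refine lt_of_le_of_lt (pv_zeros_foldl_le col row ph _ _) ?_
  show pvZeros (g.set (col + 0) (pvFillRowA (g.getD (col + 0) []) row ph)) < pvZeros g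
  have hlt := pv_count0_fillRow_lt (g.getD col []) row ph (by simpa [pvCell] using hcell) hph
  have hset := pv_zeros_set g (col + 0) (pvFillRowA (g.getD (col + 0) []) row ph) (by simpa using hcol)
  simp only [Nat.add_zero] at hset hlt ⊢
  omega

theorem pv_scanRows_some (g : List (List Int)) (pw ph : Int) (col : Nat) (L : List Nat)
    (g' : List (List Int)) (h : pvScanRows g pw ph col L = some g') :
    ∃ r, pvCell g col r = 0 ∧ g' = pvFillA g col r pw ph := by
  induction L with
  | nil => exact absurd h (by simp [pvScanRows])
  | cons r rest ih =>
    rw [pvScanRows] at h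
    split at h
    · exact ih h
    · split at h
      · rename_i hcell _
        exact ⟨r, by simpa using hcell, by simpa using h.symm⟩
      · exact ih h

theorem pv_scanCols_some (g : List (List Int)) (pw ph : Int) (L : List Nat)
    (g' : List (List Int)) (h : pvScanCols g pw ph L = some g') :
    ∃ c r, pvCell g c r = 0 ∧ g' = pvFillA g c r pw ph := by
  induction L with
  | nil => exact absurd h (by simp [pvScanCols])
  | cons c rest ih =>
    rw [pvScanCols] at h
    split at h
    · rename_i heq
      cases h
      obtain ⟨r, hr⟩ := pv_scanRows_some g pw ph c _ _ heq
      exact ⟨c, r, hr⟩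
    · exact ih h

theorem pv_zeros_lt_of_place (g g' : List (List Int)) (pw ph : Int)
    (h : pvColocarPanel g pw ph = some g') : pvZeros g' < pvZeros g := by
  rw [pvColocarPanel] at h
  split at h
  · exact absurd h (by simp)
  · rename_i hg
    obtain ⟨c, r, hcell, rfl⟩ := pv_scanCols_some g pw ph _ g' h
    exact pv_zeros_fillA_lt g c r pw ph hcell (by omega) (by omega)

-- the recursive function itself: try normal orientation, try rotated orientation, take the max.
-- fuel is a pure totalization device: every successful placement removes at least one zero cell
-- (pv_zeros_lt_of_place below), so `pvZeros g + 1` units never run out and the 0-case is unreachable.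

theorem pv_foldl_set_getElem? (row : Nat) (L : List Nat) (l : List Int) (r : Nat) :
    (L.foldl (fun l h => l.set (row + h) (1 : Int)) l)[r]? =
      if ∃ h ∈ L, row + h = r then (l[r]?).map (fun _ => (1 : Int)) else l[r]? := by
  induction L generalizing l with
  | nil => simp
  | cons h t ih =>
    simp only [List.foldl_cons]
    rw [ih (l.set (row + h) 1)]
    by_cases he : row + h = r
    · have hpos : ∃ h' ∈ h :: t, row + h' = r := ⟨h, List.mem_cons_self, he⟩
      rw [if_pos hpos]
      subst he
      rw [List.getElem?_set_self']
      split
      · cases l[row + h]? <;> simp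
      · cases l[row + h]? <;> simp
    · rw [List.getElem?_set_ne he]
      have : (∃ h' ∈ h :: t, row + h' = r) ↔ (∃ h' ∈ t, row + h' = r) := by
        simp only [List.mem_cons]
        constructor
        · rintro ⟨h', (rfl | hm), he'⟩
          · exact absurd he' he
          · exact ⟨h', hm, he'⟩
        · rintro ⟨h', hm, he'⟩; exact ⟨h', Or.inr hm, he'⟩
      rw [if_congr this rfl rfl]

theorem pv_fillRowA_getElem? (l : List Int) (row : Nat) (ph : Int) (r : Nat) :
    (pvFillRowA l row ph)[r]? =
      if row ≤ r ∧ (r : Int) < (row : Int) + ph then (l[r]?).map (fun _ => (1 : Int)) else l[r]? := by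
  rw [pvFillRowA, pv_foldl_set_getElem?]
  by_cases hc : row ≤ r ∧ (r : Int) < (row : Int) + ph
  · rw [if_pos hc, if_pos ⟨r - row, by simp [List.mem_range]; omega, by omega⟩]
  · rw [if_neg hc, if_neg ?_]
    rintro ⟨h, hm, rfl⟩
    simp [List.mem_range] at hm
    exact hc ⟨by omega, by omega⟩

theorem pv_foldl_setcol_getElem? (col row : Nat) (ph : Int) (L : List Nat) (hnd : L.Nodup)
    (g : List (List Int)) (c : Nat) :
    (L.foldl (fun g w => g.set (col + w) (pvFillRowA (g.getD (col + w) []) row ph)) g)[c]? =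
      if ∃ w ∈ L, col + w = c then (g[c]?).map (fun l => pvFillRowA l row ph) else g[c]? := by
  induction L generalizing g with
  | nil => simp
  | cons w t ih =>
    simp only [List.foldl_cons]
    rw [ih hnd.of_cons (g.set (col + w) (pvFillRowA (g.getD (col + w) []) row ph))]
    by_cases he : col + w = c
    · have hnot : ¬ ∃ w' ∈ t, col + w' = c := by
        rintro ⟨w', hm, he'⟩
        have : w' = w := by omega
        exact (List.nodup_cons.mp hnd).1 (this ▸ hm)
      rw [if_neg hnot, if_pos ⟨w, List.mem_cons_self, he⟩]
      subst he
      by_cases hcl : col + w < g.length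
      · rw [List.getElem?_set_self']
        rw [List.getD_eq_getElem?_getD, List.getElem?_eq_getElem hcl]
        simp
      · rw [List.set_eq_of_length_le (by omega), List.getElem?_eq_none (by omega)]
        simp
    · rw [List.getElem?_set_ne he]
      have : (∃ w' ∈ w :: t, col + w' = c) ↔ (∃ w' ∈ t, col + w' = c) := by
        simp only [List.mem_cons]
        constructor
        · rintro ⟨w', (rfl | hm), he'⟩
          · exact absurd he' he
          · exact ⟨w', hm, he'⟩
        · rintro ⟨w', hm, he'⟩; exact ⟨w', Or.inr hm, he'⟩
      rw [if_congr this rfl rfl]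

theorem pv_fillA_getElem? (g : List (List Int)) (col row : Nat) (pw ph : Int) (c : Nat) :
    (pvFillA g col row pw ph)[c]? =
      if col ≤ c ∧ (c : Int) < (col : Int) + pw
      then (g[c]?).map (fun l => pvFillRowA l row ph) else g[c]? := by
  rw [pvFillA, pv_foldl_setcol_getElem? col row ph _ List.nodup_range]
  by_cases hc : col ≤ c ∧ (c : Int) < (col : Int) + pw
  · rw [if_pos hc, if_pos ⟨c - col, by simp [List.mem_range]; omega, by omega⟩]
  · rw [if_neg hc, if_neg ?_]
    rintro ⟨w, hm, rfl⟩
    simp [List.mem_range] at hm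
    exact hc ⟨by omega, by omega⟩

theorem pv_fillA_eq_fillB (g : List (List Int)) (col row : Nat) (pw ph : Int) :
    pvFillA g col row pw ph = pvFillB g col row pw ph := by
  apply List.ext_getElem?
  intro c
  rw [pv_fillA_getElem?, pvFillB, List.getElem?_mapIdx]
  by_cases hc : col ≤ c ∧ (c : Int) < (col : Int) + pw
  · rw [if_pos hc]
    cases hg : g[c]? with
    | none => simp
    | some l =>
      simp only [Option.map_some]
      congr 1
      apply List.ext_getElem?
      intro r
      rw [pv_fillRowA_getElem?, List.getElem?_mapIdx]
      by_cases hr : row ≤ r ∧ (r : Int) < (row : Int) + ph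
      · rw [if_pos hr]
        cases l[r]? <;> simp [hc.1, hc.2, hr.1, hr.2]
      · rw [if_neg hr]
        cases hl : l[r]? with
        | none => simp
        | some v =>
          simp only [Option.map_some, Option.some.injEq]
          rw [if_neg (by tauto)]
  · rw [if_neg hc]
    cases hg : g[c]? with
    | none => simp
    | some l =>
      simp only [Option.map_some, Option.some.injEq]
      apply List.ext_getElem?
      intro r
      rw [List.getElem?_mapIdx]
      cases hl : l[r]? with
      | none => simp
      | some v =>
        simp only [Option.map_some, Option.some.injEq]
        rw [if_neg (by tauto)]

theorem pv_zeros_lt_of_placeB (g g' : List (List Int)) (pw ph : Int)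
    (h : pvPlaceB g pw ph = some g') : pvZeros g' < pvZeros g := by
  rw [pvPlaceB] at h
  split at h
  · exact absurd h (by simp)
  · rename_i hg
    rw [Option.map_eq_some_iff] at h
    obtain ⟨p, hfind, rfl⟩ := h
    have hfits := List.find?_some hfind
    rw [pvFitsB, Bool.and_eq_true] at hfits
    rw [← pv_fillA_eq_fillB]
    exact pv_zeros_fillA_lt g p.1 p.2 pw ph (by simpa using hfits.1) (by omega) (by omega)

-- Source B's memoized solve: result together with the updated memo dictionary.
-- Same fuel totalization as pvRec: placements strictly reduce the zero count (pv_zeros_lt_of_placeB).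

theorem pv_scanRows_eq_find (g : List (List Int)) (pw ph : Int) (col : Nat) (L : List Nat) :
    pvScanRows g pw ph col L =
      ((L.map (fun r => (col, r))).find? (pvFitsB g pw ph)).map
        (fun p => pvFillA g p.1 p.2 pw ph) := by
  induction L with
  | nil => simp [pvScanRows]
  | cons r rest ih =>
    rw [pvScanRows, List.map_cons]
    by_cases hcell : pvCell g col r ≠ 0
    · rw [if_pos hcell, List.find?_cons_of_neg (by simp [pvFitsB]; intro h; exact absurd h hcell), ih]
    · rw [if_neg hcell]
      by_cases hcond : pvCondA g col r pw ph
      · rw [if_pos hcond, List.find?_cons_of_pos (by simp_all [pvFitsB])]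
        rfl
      · rw [if_neg hcond, List.find?_cons_of_neg (by simp [pvFitsB, hcond]), ih]

theorem pv_scanCols_eq_find (g : List (List Int)) (pw ph : Int) (L : List Nat) :
    pvScanCols g pw ph L =
      ((L.flatMap (fun c => (List.range (pvRows g)).map (fun r => (c, r)))).find?
          (pvFitsB g pw ph)).map
        (fun p => pvFillA g p.1 p.2 pw ph) := by
  induction L with
  | nil => simp [pvScanCols]
  | cons c rest ih =>
    rw [pvScanCols, List.flatMap_cons, List.find?_append, pv_scanRows_eq_find g pw ph c]
    cases hf : ((List.range (pvRows g)).map (fun r => (c, r))).find? (pvFitsB g pw ph) with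
    | some p => simp
    | none => simp [ih]

theorem pv_place_eq (g : List (List Int)) (pw ph : Int) :
    pvPlaceB g pw ph = pvColocarPanel g pw ph := by
  rw [pvPlaceB, pvColocarPanel]
  by_cases hg : pw ≤ 0 ∨ ph ≤ 0
  · rw [if_pos hg, if_pos hg]
  · rw [if_neg hg, if_neg hg, pv_scanCols_eq_find]
    cases hfind : ((List.range g.length).flatMap
        (fun c => (List.range (pvRows g)).map (fun r => (c, r)))).find? (pvFitsB g pw ph) <;>
      simp [pv_fillA_eq_fillB]

-- memo-correctness invariant: every stored value is A's value on its key
def pvInv (memo : PySem.Dict (List (List Int) × Int × Int) Int) : Prop :=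
  ∀ g pw ph v, memo.get? (g, pw, ph) = some v → v = colocar_paneles_recursivamente g pw ph

theorem pvRec_fuel : ∀ (f1 : Nat) (g : List (List Int)) (pw ph : Int) (f2 : Nat),
    pvZeros g < f1 → pvZeros g < f2 → pvRec f1 g pw ph = pvRec f2 g pw ph := by
  intro f1
  induction f1 with
  | zero => intro g pw ph f2 h1; exact absurd h1 (by omega)
  | succ f ih =>
    intro g pw ph f2 h1 h2
    cases f2 with
    | zero => exact absurd h2 (by omega)
    | succ f2 =>
      have z1 : ∀ g', pvColocarPanel g pw ph = some g' →
          pvRec f g' pw ph = pvRec f2 g' pw ph := fun g' hp =>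
        ih g' pw ph f2
          (by have := pv_zeros_lt_of_place g g' pw ph hp; omega)
          (by have := pv_zeros_lt_of_place g g' pw ph hp; omega)
      have z2 : ∀ g', pvColocarPanel g ph pw = some g' →
          pvRec f g' ph pw = pvRec f2 g' ph pw := fun g' hp =>
        ih g' ph pw f2
          (by have := pv_zeros_lt_of_place g g' ph pw hp; omega)
          (by have := pv_zeros_lt_of_place g g' ph pw hp; omega)
      cases hp1 : pvColocarPanel g pw ph <;> cases hp2 : pvColocarPanel g ph pw <;>
        simp only [pvRec, hp1, hp2]
      · rw [z2 _ hp2]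
      · rw [z1 _ hp1]
      · rw [z1 _ hp1, z2 _ hp2]

theorem pvA_unfold (g : List (List Int)) (pw ph : Int) :
    colocar_paneles_recursivamente g pw ph =
      max ((pvColocarPanel g pw ph).elim 0 (fun g' => 1 + colocar_paneles_recursivamente g' pw ph))
          ((pvColocarPanel g ph pw).elim 0 (fun g' => 1 + colocar_paneles_recursivamente g' ph pw)) := by
  have e1 : ∀ g', pvColocarPanel g pw ph = some g' →
      pvRec (pvZeros g) g' pw ph = colocar_paneles_recursivamente g' pw ph := fun g' hp =>
    pvRec_fuel (pvZeros g) g' pw ph (pvZeros g' + 1)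
      (pv_zeros_lt_of_place g g' pw ph hp) (by omega)
  have e2 : ∀ g', pvColocarPanel g ph pw = some g' →
      pvRec (pvZeros g) g' ph pw = colocar_paneles_recursivamente g' ph pw := fun g' hp =>
    pvRec_fuel (pvZeros g) g' ph pw (pvZeros g' + 1)
      (pv_zeros_lt_of_place g g' ph pw hp) (by omega)
  rw [colocar_paneles_recursivamente]
  cases hp1 : pvColocarPanel g pw ph <;> cases hp2 : pvColocarPanel g ph pw <;>
    simp only [pvRec, hp1, hp2, Option.elim]
  · rw [e2 _ hp2]
  · rw [e1 _ hp1]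
  · rw [e1 _ hp1, e2 _ hp2]

-- one orientation branch of pvSolve, as a function of the incoming memo
def pvStep (fuel : Nat) (memo : PySem.Dict (List (List Int) × Int × Int) Int)
    (g : List (List Int)) (pw ph : Int) :
    Int × PySem.Dict (List (List Int) × Int × Int) Int :=
  (pvPlaceB g pw ph).elim (0, memo)
    (fun g' => (1 + (pvSolve fuel memo g' pw ph).1, (pvSolve fuel memo g' pw ph).2))

theorem pvSolve_eq (fuel : Nat) (memo : PySem.Dict (List (List Int) × Int × Int) Int)
    (g : List (List Int)) (pw ph : Int) (h : memo.get? (g, pw, ph) = none) :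
    pvSolve (fuel + 1) memo g pw ph =
      (max (pvStep fuel memo g pw ph).1 (pvStep fuel (pvStep fuel memo g pw ph).2 g ph pw).1,
       ((pvStep fuel (pvStep fuel memo g pw ph).2 g ph pw).2).insert (g, pw, ph)
         (max (pvStep fuel memo g pw ph).1 (pvStep fuel (pvStep fuel memo g pw ph).2 g ph pw).1)) := by
  rw [pvSolve, h]
  unfold pvStep
  cases pvPlaceB g pw ph <;> cases pvPlaceB g ph pw <;> rfl

theorem pv_solve_correct (fuel : Nat) : ∀ (g : List (List Int)) (pw ph : Int) memo,
    pvZeros g < fuel → pvInv memo →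
    (pvSolve fuel memo g pw ph).1 = colocar_paneles_recursivamente g pw ph ∧
      pvInv (pvSolve fuel memo g pw ph).2 := by
  induction fuel with
  | zero => intro g pw ph memo hz; exact absurd hz (by omega)
  | succ n ih =>
    intro g pw ph memo hz hinv
    cases hm : memo.get? (g, pw, ph) with
    | some v =>
      have : pvSolve (n + 1) memo g pw ph = (v, memo) := by rw [pvSolve, hm]
      rw [this]
      exact ⟨hinv g pw ph v hm, hinv⟩
    | none =>
      have step : ∀ (m : PySem.Dict (List (List Int) × Int × Int) Int) (pw' ph' : Int),
          pvInv m →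
          (pvStep n m g pw' ph').1 =
            (pvColocarPanel g pw' ph').elim 0
              (fun g' => 1 + colocar_paneles_recursivamente g' pw' ph') ∧
            pvInv (pvStep n m g pw' ph').2 := by
        intro m pw' ph' hm'
        cases hp : pvPlaceB g pw' ph' with
        | none =>
          have hpA : pvColocarPanel g pw' ph' = none := pv_place_eq g pw' ph' ▸ hp
          rw [pvStep, hp, hpA]
          exact ⟨rfl, hm'⟩
        | some g' =>
          have hpA : pvColocarPanel g pw' ph' = some g' := pv_place_eq g pw' ph' ▸ hp
          have hz' : pvZeros g' < n := by
            have := pv_zeros_lt_of_placeB g g' pw' ph' hp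
            omega
          obtain ⟨e, hi⟩ := ih g' pw' ph' m hz' hm'
          rw [pvStep, hp, hpA]
          exact ⟨by simp [e], hi⟩
      obtain ⟨e1, hi1⟩ := step memo pw ph hinv
      obtain ⟨e2, hi2⟩ := step (pvStep n memo g pw ph).2 ph pw hi1
      rw [pvSolve_eq n memo g pw ph hm]
      have hval : max (pvStep n memo g pw ph).1 (pvStep n (pvStep n memo g pw ph).2 g ph pw).1 =
          colocar_paneles_recursivamente g pw ph := by
        rw [e1, e2, ← pvA_unfold]
      refine ⟨hval, ?_⟩
      intro g0 pw0 ph0 v0 hget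
      rw [PySem.Dict.get?_insert] at hget
      split at hget
      · rename_i hkey
        obtain ⟨rfl, rfl, rfl⟩ : g0 = g ∧ pw0 = pw ∧ ph0 = ph := by
          simpa [Prod.ext_iff] using hkey
        cases hget
        exact hval.symm ▸ rfl
      · exact hi2 g0 pw0 ph0 v0 hget

-- ===== VERDICT (by name: the statement is the Claim_ definition above) =====
theorem colocar_paneles_recursivamente_spec : Claim_equal_colocar_paneles_recursivamente := by
  intro g pw ph _ _
  unfold Spec_colocar_paneles_recursivamente colocar_paneles_recursivamente_alt
  exact ((pv_solve_correct (pvZeros g + 1) g pw ph PySem.Dict.empty (by omega)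
    (fun _ _ _ _ h => absurd h (by simp [PySem.Dict.get?_empty]))).1).symm
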